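-- pv_equiv track=rewrite | github.com/RPChinhara/Competitive-Programming | doctor_income.py | calculate_fees
-- ===== SOURCE A (Python) =====
-- def calculate_fees(age_list):
--     fees = 0
--
--     for i in age_list:
--         if i < 17:
--             fees+=200
--         elif i < 40:
--             fees+=400
--         else:
--             fees+=300
--
--     return fees
-- ===== SOURCE B (Python) =====
-- def _bisect_left(s, x):
--     # standard-library bisect.bisect_left algorithm (written out: A imports no modules)
--     lo, hi = 0, len(s)
--     while lo < hi:
--         mid = (lo + hi) // 2
--         if s[mid] < x:
--             lo = mid + 1
--         else:
--             hi = mid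
--     return lo
--
--
-- def calculate_fees(age_list):
--     s = sorted(age_list)
--     a = _bisect_left(s, 17)
--     b = _bisect_left(s, 40)
--     return 200 * a + 400 * (b - a) + 300 * (len(s) - b)
-- ===== Notes on version B (the rewrite author's own statement) =====
-- stated objective: alternative
-- what changed: Replaces the per-element branch-and-accumulate loop with sort + two binary searches for the bracket boundaries 17 and 40, returning the closed-form total 200*a + 400*(b-a) + 300*(n-b).
import Mathlib
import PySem

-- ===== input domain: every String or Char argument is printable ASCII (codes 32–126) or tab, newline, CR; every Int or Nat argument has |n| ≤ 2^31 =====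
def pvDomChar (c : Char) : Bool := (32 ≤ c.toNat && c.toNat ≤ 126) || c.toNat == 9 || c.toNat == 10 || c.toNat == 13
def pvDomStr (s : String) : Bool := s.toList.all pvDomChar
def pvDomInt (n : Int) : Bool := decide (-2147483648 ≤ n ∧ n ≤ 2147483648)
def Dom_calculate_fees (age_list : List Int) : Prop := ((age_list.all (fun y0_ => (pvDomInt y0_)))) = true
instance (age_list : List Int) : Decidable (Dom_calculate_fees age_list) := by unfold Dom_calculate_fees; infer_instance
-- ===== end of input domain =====

-- B replaces A's per-element branch-and-accumulate loop by sort + two binary searches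
-- (bisect_left at 17 and 40) and a closed-form total over the bracket counts (alternative decomposition).


-- ===== PORT A =====
def calculate_fees (age_list : List Int) : Int :=
  age_list.foldl
    (fun fees i =>
      if i < 17 then fees + 200
      else if i < 40 then fees + 400
      else fees + 300)
    0

-- ===== PORT B =====
-- _bisect_left in Source B is the standard bisect.bisect_left loop, written out; its exact
-- PySem counterpart is PySem.List.bisectLeft.
def calculate_fees_alt (age_list : List Int) : Int :=
  let s := PySem.List.sorted age_list (fun x => x) false
  let a : Int := (PySem.List.bisectLeft s 17 : Nat)
  let b : Int := (PySem.List.bisectLeft s 40 : Nat)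
  200 * a + 400 * (b - a) + 300 * ((s.length : Int) - b)

-- ===== PRECONDITION & SPEC =====
def Spec_calculate_fees (age_list : List Int) (out : Int) : Prop := out = calculate_fees_alt age_list
instance (age_list : List Int) (out : Int) : Decidable (Spec_calculate_fees age_list out) := by unfold Spec_calculate_fees; infer_instance

-- ===== CLAIM (what is proved, stated in full; the proofs are below) =====
def Claim_equal_calculate_fees : Prop := ∀ (age_list : List Int), Dom_calculate_fees age_list → Spec_calculate_fees age_list (calculate_fees age_list)

-- ===== LEMMAS AND PROOFS =====

-- On a sorted (ascending) list, bisectLeft at x counts the elements < x.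
lemma bisectLeft_eq_countP (s : List Int) (x : Int)
    (hs : List.Pairwise (fun a b => a ≤ b) s) :
    PySem.List.bisectLeft s x = s.countP (fun y => decide (y < x)) := by
  obtain ⟨hle, hlt, hge⟩ := PySem.List.bisectLeft_spec s x hs
  set k := PySem.List.bisectLeft s x with hk
  have hsplit : s = s.take k ++ s.drop k := (List.take_append_drop k s).symm
  have h1 : (s.take k).countP (fun y => decide (y < x)) = (s.take k).length := by
    apply List.countP_eq_length.mpr
    intro y hy
    obtain ⟨j, hj, rfl⟩ := List.mem_iff_getElem.mp hy
    have hjk : j < k := lt_of_lt_of_le hj (by simp)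
    have hjs : j < s.length := lt_of_lt_of_le hjk hle
    have := hlt j hjs hjk
    simp only [List.getElem_take]
    exact decide_eq_true this
  have h2 : (s.drop k).countP (fun y => decide (y < x)) = 0 := by
    apply List.countP_eq_zero.mpr
    intro y hy
    obtain ⟨j, hj, rfl⟩ := List.mem_iff_getElem.mp hy
    have hjs : k + j < s.length := by
      have := hj; simp [List.length_drop] at this; omega
    have := hge (k + j) hjs (Nat.le_add_right _ _)
    simp only [List.getElem_drop]
    simp; omega
  calc k = (s.take k).length := by simp [List.length_take]; omega
    _ = s.countP (fun y => decide (y < x)) := by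
        conv_rhs => rw [hsplit]
        rw [List.countP_append, h1, h2]
        omega

-- Loop invariant for A's fold.
lemma foldl_fees (l : List Int) (acc : Int) :
    l.foldl (fun fees i => if i < 17 then fees + 200
                           else if i < 40 then fees + 400 else fees + 300) acc
      = acc + 200 * (l.countP (fun y => decide (y < 17)) : Int)
            + 400 * ((l.countP (fun y => decide (y < 40)) : Int)
                      - (l.countP (fun y => decide (y < 17)) : Int))
            + 300 * ((l.length : Int) - (l.countP (fun y => decide (y < 40)) : Int)) := by
  induction l generalizing acc with
  | nil => simp
  | cons a t ih =>
      simp only [List.foldl_cons, List.countP_cons, List.length_cons, ih]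
      by_cases h17 : a < 17
      · have h40 : a < 40 := by omega
        simp [h17, h40]; ring
      · by_cases h40 : a < 40
        · simp [h17, h40]; ring
        · simp [h17, h40]; ring

-- ===== VERDICT (by name: the statement is the Claim_ definition above) =====
theorem calculate_fees_spec : Claim_equal_calculate_fees := by
  intro age_list _
  unfold Spec_calculate_fees calculate_fees calculate_fees_alt
  set s := PySem.List.sorted age_list (fun x => x) false with hsdef
  have hperm : s.Perm age_list := PySem.List.sorted_perm age_list (fun x => x) false
  have hpw : List.Pairwise (fun a b => a ≤ b) s := PySem.List.sorted_pairwise age_list (fun x => x)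
  have h17 := bisectLeft_eq_countP s 17 hpw
  have h40 := bisectLeft_eq_countP s 40 hpw
  have hc17 : s.countP (fun y => decide (y < 17)) = age_list.countP (fun y => decide (y < 17)) :=
    hperm.countP_eq _
  have hc40 : s.countP (fun y => decide (y < 40)) = age_list.countP (fun y => decide (y < 40)) :=
    hperm.countP_eq _
  have hlen : s.length = age_list.length := hperm.length_eq
  rw [foldl_fees]
  simp only [h17, h40, hc17, hc40, hlen]
  ring
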